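-- pv_equiv track=rewrite | github.com/filipmarchidan/ComputationalIntelligence-CollaborativeAI | Ant Colony Optimization/TSP/GeneticAlgorithm.py | replace_duplicates
-- ===== SOURCE A (Python) =====
-- def replace_duplicates(child1, child2):
--     duplicates1 = []
--     duplicates2 = []
--     indices1 = []
--     indices2 = []
--
--     # Find duplicates in first child
--     for i in range(len(child1)):
--         if child1.count(child1[i]) > 1 and child1[i] not in duplicates1:
--             duplicates1.append(child1[i])
--             indices1.append(i)
--
--     if len(duplicates1) == 0:
--         return child1, child2
--
--     # Find duplicates in second child
--     for i in range(len(child2)):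
--         if child2.count(child2[i]) > 1 and child2[i] not in duplicates2:
--             duplicates2.append(child2[i])
--             indices2.append(i)
--
--     for i in range(len(duplicates1)):
--         child1[indices1[i]] = duplicates2[i]
--         child2[indices2[i]] = duplicates1[i]
--
--     return child1, child2
-- ===== SOURCE B (Python) =====
-- def replace_duplicates(child1, child2):
--     # sort-based: indices sorted by (value, index); a duplicated value's indices form a
--     # run whose head is its first index; rebuild each child via an index->value dict
--     pairs1 = _first_dup_indices(child1)
--     if not pairs1:
--         return child1, child2
--     pairs2 = _first_dup_indices(child2)
--     rep1 = dict(zip([i for i, _ in pairs1], [v for _, v in pairs2]))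
--     rep2 = dict(zip([i for i, _ in pairs2], [v for _, v in pairs1]))
--     child1[:] = [rep1.get(i, x) for i, x in enumerate(child1)]
--     child2[:] = [rep2.get(i, x) for i, x in enumerate(child2)]
--     return child1, child2
--
--
-- def _first_dup_indices(lst):
--     # (first index, value) of every value occurring more than once, ordered by index
--     order = sorted(range(len(lst)), key=lambda i: (lst[i], i))
--     firsts = [(order[j], lst[order[j]])
--               for j in range(len(order))
--               if (j == 0 or lst[order[j]] != lst[order[j - 1]])
--               and j + 1 < len(order) and lst[order[j]] == lst[order[j + 1]]]
--     firsts.sort()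
--     return firsts
-- ===== Notes on version B (the rewrite author's own statement) =====
-- stated objective: faster
-- what changed: A rescans the list with list.count and a membership test at every position and then mutates by an index loop; B sorts the indices by (value, index) once, reads each duplicated value's first index off adjacent entries of the sorted order, and rebuilds each child in one pass through an index->value replacement dict.
import Mathlib
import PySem

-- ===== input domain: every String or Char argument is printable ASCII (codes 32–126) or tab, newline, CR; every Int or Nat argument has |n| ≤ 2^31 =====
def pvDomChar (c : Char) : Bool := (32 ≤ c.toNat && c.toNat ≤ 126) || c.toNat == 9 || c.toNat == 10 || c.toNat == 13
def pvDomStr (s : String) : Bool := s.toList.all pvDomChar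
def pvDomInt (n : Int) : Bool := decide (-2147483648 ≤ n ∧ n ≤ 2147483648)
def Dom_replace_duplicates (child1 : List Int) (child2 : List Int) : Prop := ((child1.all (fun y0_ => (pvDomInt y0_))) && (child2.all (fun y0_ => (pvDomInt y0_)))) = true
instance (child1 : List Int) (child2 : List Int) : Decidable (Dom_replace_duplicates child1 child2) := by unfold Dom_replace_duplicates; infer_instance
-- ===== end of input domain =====

-- B replaces A's quadratic count/membership scans by one sort of the indices by (value, index) — each duplicated
-- value's first index is read off adjacent entries of the sorted order — and rebuilds each child through an
-- index->value replacement dict (both versions mutate the children in place in Python; values proved equal here).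


-- ===== PORT A =====
-- A's duplicate-finding loop: for i in range(len(xs)): if xs.count(xs[i]) > 1 and xs[i] not in dups: append
def rdFindDups (xs : List Int) : List Int × List Int :=
  (PySem.List.pyRange 0 (PySem.List.len xs) 1).foldl
    (fun (st : List Int × List Int) i =>
      if 1 < xs.count (PySem.List.pyGetD xs i 0) ∧ PySem.List.pyGetD xs i 0 ∉ st.1
      then (st.1 ++ [PySem.List.pyGetD xs i 0], st.2 ++ [i]) else st)
    ([], [])

def replace_duplicates (child1 : List Int) (child2 : List Int) : List Int × List Int :=
  let r1 := rdFindDups child1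
  if r1.1.length = 0 then (child1, child2)
  else
    let r2 := rdFindDups child2
    (PySem.List.pyRange 0 (PySem.List.len r1.1) 1).foldl
      (fun (st : List Int × List Int) i =>
        (PySem.List.pySetD st.1 (PySem.List.pyGetD r1.2 i 0) (PySem.List.pyGetD r2.1 i 0),
         PySem.List.pySetD st.2 (PySem.List.pyGetD r2.2 i 0) (PySem.List.pyGetD r1.1 i 0)))
      (child1, child2)

-- ===== PORT B =====
-- Source B's _first_dup_indices: indices sorted by (value, index); a position j of the sorted order starts a run of
-- a duplicated value iff its value differs from its left neighbour and equals its right one; then sort by index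
def rdFirstDups (xs : List Int) : List (Int × Int) :=
  let order := PySem.List.sorted2 (PySem.List.pyRange 0 (PySem.List.len xs) 1)
    (fun i => PySem.List.pyGetD xs i 0) (fun i => i)
  let firsts := (PySem.List.pyRange 0 (PySem.List.len order) 1).filterMap (fun j =>
    if (j = 0 ∨ PySem.List.pyGetD xs (PySem.List.pyGetD order j 0) 0
          ≠ PySem.List.pyGetD xs (PySem.List.pyGetD order (j - 1) 0) 0)
        ∧ j + 1 < PySem.List.len order
        ∧ PySem.List.pyGetD xs (PySem.List.pyGetD order j 0) 0
          = PySem.List.pyGetD xs (PySem.List.pyGetD order (j + 1) 0) 0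
    then some (PySem.List.pyGetD order j 0, PySem.List.pyGetD xs (PySem.List.pyGetD order j 0) 0)
    else none)
  PySem.List.sorted2 firsts (fun p => p.1) (fun p => p.2)

def replace_duplicates_alt (child1 : List Int) (child2 : List Int) : List Int × List Int :=
  let p1 := rdFirstDups child1
  if p1 = [] then (child1, child2)
  else
    let p2 := rdFirstDups child2
    let rep1 := PySem.Dict.ofList (List.zip (p1.map (·.1)) (p2.map (·.2)))
    let rep2 := PySem.Dict.ofList (List.zip (p2.map (·.1)) (p1.map (·.2)))
    ((PySem.List.enumerate child1 0).map (fun q => rep1.getD q.1 q.2),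
     (PySem.List.enumerate child2 0).map (fun q => rep2.getD q.1 q.2))

-- ===== PRECONDITION & SPEC =====
-- number of distinct values occurring more than once in xs (= len(duplicates1/2) in A)
def pvDupCount (xs : List Int) : Nat :=
  ((PySem.Set.ofList xs).filter (fun v => decide (1 < xs.count v))).length

-- Pre_ excludes exactly the inputs where child1 has MORE distinct duplicated values than child2: there the
-- Python A raises IndexError on duplicates2[i].
def Pre_replace_duplicates (child1 : List Int) (child2 : List Int) : Prop :=
  pvDupCount child1 = 0 ∨ pvDupCount child1 ≤ pvDupCount child2
instance (child1 : List Int) (child2 : List Int) : Decidable (Pre_replace_duplicates child1 child2) := by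
  unfold Pre_replace_duplicates; infer_instance

def pvWitness_replace_duplicates : List Int × List Int := ([1, 1, 2], [3, 4, 3])

def Spec_replace_duplicates (child1 : List Int) (child2 : List Int) (out : List Int × List Int) : Prop := out = replace_duplicates_alt child1 child2
instance (child1 : List Int) (child2 : List Int) (out : List Int × List Int) : Decidable (Spec_replace_duplicates child1 child2 out) := by unfold Spec_replace_duplicates; infer_instance

-- ===== CLAIM (what is proved, stated in full; the proofs are below) =====
def Claim_equal_replace_duplicates : Prop := ∀ (child1 : List Int) (child2 : List Int), Dom_replace_duplicates child1 child2 → Pre_replace_duplicates child1 child2 → Spec_replace_duplicates child1 child2 (replace_duplicates child1 child2)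

-- ===== LEMMAS AND PROOFS =====

-- the common middle point both ports are reduced to: (first index, value) of every duplicated value, by index
def rdCanonUpTo (xs : List Int) (m : Nat) : List (Int × Int) :=
  (List.range m).filterMap (fun k =>
    if 1 < xs.count (xs.getD k 0) ∧ xs.getD k 0 ∉ xs.take k
    then some ((k : Int), xs.getD k 0) else none)

def rdCanon (xs : List Int) : List (Int × Int) := rdCanonUpTo xs xs.length



theorem canonUpTo_succ (xs : List Int) (m : Nat) :
    rdCanonUpTo xs (m + 1) = rdCanonUpTo xs m ++
      (if 1 < xs.count (xs.getD m 0) ∧ xs.getD m 0 ∉ xs.take m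
       then [((m : Int), xs.getD m 0)] else []) := by
  unfold rdCanonUpTo
  rw [List.range_succ, List.filterMap_append]
  congr 1
  rw [List.filterMap_cons, List.filterMap_nil]
  by_cases h : 1 < xs.count (xs.getD m 0) ∧ xs.getD m 0 ∉ xs.take m
  · rw [if_pos h, if_pos h]
  · rw [if_neg h, if_neg h]

theorem canon_snd (xs : List Int) (m : Nat) (hm : m ≤ xs.length) :
    (rdCanonUpTo xs m).map (·.2)
      = (PySem.Set.ofList (xs.take m)).filter (fun v => decide (1 < xs.count v)) := by
  induction m with
  | zero => simp [rdCanonUpTo]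
  | succ m ih =>
    have hmn : m < xs.length := hm
    have hget : xs.getD m 0 = xs[m] := List.getD_eq_getElem xs 0 hmn
    have htake : xs.take (m + 1) = xs.take m ++ [xs[m]] := by
      rw [List.take_add_one]
      simp [List.getElem?_eq_getElem hmn]
    rw [canonUpTo_succ, List.map_append, ih (Nat.le_of_lt hmn), htake,
      PySem.Set.ofList_append_singleton, PySem.Set.add_eq_ite]
    by_cases hmem : xs[m] ∈ xs.take m
    · have hsetmem : xs[m] ∈ PySem.Set.ofList (xs.take m) := (PySem.Set.mem_ofList _ _).mpr hmem
      rw [if_pos hsetmem, if_neg (by rw [hget]; tauto)]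
      simp
    · have hsetmem : xs[m] ∉ PySem.Set.ofList (xs.take m) := fun h =>
        hmem ((PySem.Set.mem_ofList _ _).mp h)
      rw [if_neg hsetmem, List.filter_append]
      by_cases hc : 1 < xs.count xs[m]
      · rw [if_pos (by rw [hget]; exact ⟨hc, hmem⟩)]
        simp [hc]
        rw [List.getElem?_eq_getElem hmn]; rfl
      · rw [if_neg (by rw [hget]; tauto)]
        simp [hc]

theorem mem_canon_snd (xs : List Int) (m : Nat) (hm : m ≤ xs.length) (v : Int) :
    v ∈ (rdCanonUpTo xs m).map (·.2) ↔ 1 < xs.count v ∧ v ∈ xs.take m := by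
  rw [canon_snd xs m hm]
  simp only [List.mem_filter, PySem.Set.mem_ofList, decide_eq_true_eq]
  tauto

theorem canon_length (xs : List Int) : (rdCanon xs).length = pvDupCount xs := by
  have := canon_snd xs xs.length le_rfl
  rw [List.take_length] at this
  calc (rdCanon xs).length = ((rdCanon xs).map (·.2)).length := by rw [List.length_map]
    _ = pvDupCount xs := by rw [rdCanon, this]; rfl

theorem canon_fst_bounds (xs : List Int) : ∀ p ∈ rdCanon xs, 0 ≤ p.1 ∧ p.1 < (xs.length : Int) := by
  intro p hp
  rcases List.mem_filterMap.mp hp with ⟨k, hk, hbody⟩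
  rw [List.mem_range] at hk
  by_cases h : 1 < xs.count (xs.getD k 0) ∧ xs.getD k 0 ∉ xs.take k
  · rw [if_pos h] at hbody
    cases hbody
    refine ⟨by simp, by simp; omega⟩
  · rw [if_neg h] at hbody
    cases hbody

theorem findDups_aux (xs : List Int) (m : Nat) (hm : m ≤ xs.length) :
    (List.range m).foldl (fun (st : List Int × List Int) (k : Nat) =>
        if 1 < xs.count (PySem.List.pyGetD xs (k : Int) 0) ∧ PySem.List.pyGetD xs (k : Int) 0 ∉ st.1
        then (st.1 ++ [PySem.List.pyGetD xs (k : Int) 0], st.2 ++ [(k : Int)]) else st) ([], [])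
      = ((rdCanonUpTo xs m).map (·.2), (rdCanonUpTo xs m).map (·.1)) := by
  induction m with
  | zero => simp [rdCanonUpTo]
  | succ m ih =>
    have hmn : m < xs.length := hm
    rw [List.range_succ, List.foldl_append, ih (Nat.le_of_lt hmn)]
    simp only [List.foldl_cons, List.foldl_nil, PySem.List.pyGetD_natCast]
    have hmem := mem_canon_snd xs m (Nat.le_of_lt hmn) (xs.getD m 0)
    rw [canonUpTo_succ]
    by_cases hc : 1 < xs.count (xs.getD m 0) ∧ xs.getD m 0 ∉ xs.take m
    · rw [if_pos (by constructor; exact hc.1; rw [hmem]; tauto), if_pos hc]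
      simp
    · rw [if_neg (by rw [hmem]; tauto), if_neg hc]
      simp


theorem findDups_eq (xs : List Int) :
    rdFindDups xs = ((rdCanon xs).map (·.2), (rdCanon xs).map (·.1)) := by
  unfold rdFindDups
  rw [PySem.List.len_eq, PySem.List.pyRange_zero_nat, List.foldl_map]
  exact findDups_aux xs xs.length le_rfl


theorem sorted2_eq_sorted_lex {α : Type} (xs : List α) (k1 k2 : α → Int) :
    PySem.List.sorted2 xs k1 k2
      = PySem.List.sorted xs (fun x => (toLex (k1 x, k2 x) : Int ×ₗ Int)) := by
  rw [PySem.List.sorted_eq_foldl_insertBy]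
  simp only [PySem.List.sorted2]
  congr 1
  funext acc x
  congr 1
  funext a b
  by_cases h1 : k1 a < k1 b <;> by_cases h2 : k1 b < k1 a <;> by_cases h3 : k2 a < k2 b <;>
    simp [h1, h2, h3, Prod.Lex.lt_iff, ofLex_toLex] <;> omega

theorem sorted2_eq_of_perm_of_pairwise_lt {α : Type} (xs ys : List α) (k1 k2 : α → Int)
    (hp : ys.Perm xs)
    (hs : ys.Pairwise (fun a b => (toLex (k1 a, k2 a) : Int ×ₗ Int) < toLex (k1 b, k2 b))) :
    PySem.List.sorted2 xs k1 k2 = ys := by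
  rw [sorted2_eq_sorted_lex]
  exact PySem.List.sorted_eq_of_perm_of_pairwise_lt xs ys _ hp hs

def rdOrder (xs : List Int) : List Int :=
  PySem.List.sorted (PySem.List.pyRange 0 (PySem.List.len xs) 1)
    (fun i => (toLex (PySem.List.pyGetD xs i 0, i) : Int ×ₗ Int))

theorem rdOrder_perm (xs : List Int) :
    (rdOrder xs).Perm (PySem.List.pyRange 0 (xs.length : Int) 1) := by
  have := PySem.List.sorted_perm (PySem.List.pyRange 0 (PySem.List.len xs) 1)
    (fun i => (toLex (PySem.List.pyGetD xs i 0, i) : Int ×ₗ Int)) false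
  simpa [rdOrder] using this


theorem rdOrder_mem (xs : List Int) (i : Int) :
    i ∈ rdOrder xs ↔ 0 ≤ i ∧ i < (xs.length : Int) := by
  rw [(rdOrder_perm xs).mem_iff, PySem.List.mem_pyRange_one]

theorem rdOrder_nodup (xs : List Int) : (rdOrder xs).Nodup :=
  (rdOrder_perm xs).nodup_iff.mpr (PySem.List.nodup_pyRange_one 0 _)

theorem rdOrder_pairwise (xs : List Int) :
    (rdOrder xs).Pairwise (fun a b =>
      (toLex (PySem.List.pyGetD xs a 0, a) : Int ×ₗ Int) < toLex (PySem.List.pyGetD xs b 0, b)) := by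
  have hle := PySem.List.sorted_pairwise (PySem.List.pyRange 0 (PySem.List.len xs) 1)
    (fun i => (toLex (PySem.List.pyGetD xs i 0, i) : Int ×ₗ Int))
  have hne : (rdOrder xs).Pairwise (fun a b => a ≠ b) := rdOrder_nodup xs
  have hand := (hle.and hne)
  refine hand.imp ?_
  rintro a b ⟨h1, h2⟩
  refine lt_of_le_of_ne h1 ?_
  intro h
  exact h2 (congrArg (fun p => (ofLex p).2) h)

theorem rdOrder_key_lt (xs : List Int) (j j' : Nat) (hj : j < (rdOrder xs).length)
    (hj' : j' < (rdOrder xs).length) (h : j < j') :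
    (toLex (PySem.List.pyGetD xs ((rdOrder xs)[j]) 0, (rdOrder xs)[j]) : Int ×ₗ Int)
      < toLex (PySem.List.pyGetD xs ((rdOrder xs)[j']) 0, (rdOrder xs)[j']) :=
  List.pairwise_iff_getElem.mp (rdOrder_pairwise xs) j j' hj hj' h

theorem rdOrder_pos_lt (xs : List Int) (j j' : Nat) (hj : j < (rdOrder xs).length)
    (hj' : j' < (rdOrder xs).length)
    (h : (toLex (PySem.List.pyGetD xs ((rdOrder xs)[j]) 0, (rdOrder xs)[j]) : Int ×ₗ Int)
      < toLex (PySem.List.pyGetD xs ((rdOrder xs)[j']) 0, (rdOrder xs)[j'])) : j < j' := by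
  rcases Nat.lt_trichotomy j j' with h1 | h1 | h1
  · exact h1
  · subst h1; exact absurd h (lt_irrefl _)
  · exact absurd (rdOrder_key_lt xs j' j hj' hj h1) (lt_asymm h)

theorem rdOrder_elem_bounds (xs : List Int) (j : Nat) (hj : j < (rdOrder xs).length) :
    0 ≤ (rdOrder xs)[j] ∧ (rdOrder xs)[j] < (xs.length : Int) :=
  (rdOrder_mem xs _).mp (List.getElem_mem hj)

theorem rdOrder_idx (xs : List Int) (i : Int) (h0 : 0 ≤ i) (hn : i < (xs.length : Int)) :
    ∃ j, ∃ hj : j < (rdOrder xs).length, (rdOrder xs)[j] = i :=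
  List.mem_iff_getElem.mp ((rdOrder_mem xs i).mpr ⟨h0, hn⟩)

theorem rdOrder_countP (xs : List Int) (v : Int) :
    xs.count v = (rdOrder xs).countP (fun i => PySem.List.pyGetD xs i 0 == v) :=
  calc xs.count v = List.countP (fun x => x == v) xs := List.count_eq_countP
    _ = List.countP (fun x => x == v)
        ((PySem.List.pyRange 0 (xs.length : Int) 1).map (fun j => PySem.List.pyGetD xs j 0)) := by
          rw [PySem.List.map_pyGetD_pyRange_zero' xs 0]
    _ = (PySem.List.pyRange 0 (xs.length : Int) 1).countP
        ((fun x => x == v) ∘ (fun j => PySem.List.pyGetD xs j 0)) := List.countP_map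
    _ = (rdOrder xs).countP (fun i => PySem.List.pyGetD xs i 0 == v) :=
        ((rdOrder_perm xs).countP_eq _).symm

theorem mem_take_iff_idx {α : Type} (xs : List α) (t : Nat) (v : α) :
    v ∈ xs.take t ↔ ∃ k, k < t ∧ ∃ hk : k < xs.length, xs[k] = v := by
  constructor
  · intro h
    rcases List.mem_iff_getElem.mp h with ⟨k, hk, hval⟩
    have hkt : k < t ⊓ xs.length := by simpa [List.length_take] using hk
    exact ⟨k, by omega, by omega, by rw [← List.getElem_take (h := hk)]; exact hval⟩
  · rintro ⟨k, hkt, hk, rfl⟩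
    refine List.mem_iff_getElem.mpr ⟨k, by simp [List.length_take]; omega, ?_⟩
    rw [List.getElem_take]

theorem mem_drop_iff_idx {α : Type} (xs : List α) (m : Nat) (v : α) (h : v ∈ xs.drop m) :
    ∃ t, ∃ ht : m + t < xs.length, xs[m + t] = v := by
  rcases List.mem_iff_getElem.mp h with ⟨t, ht, hval⟩
  have ht' : m + t < xs.length := by
    have := List.length_drop (l := xs) (i := m)
    omega
  exact ⟨t, ht', by rw [← List.getElem_drop (h := ht)]; exact hval⟩

theorem rdV_eq (xs : List Int) (i : Int) (h0 : 0 ≤ i) :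
    PySem.List.pyGetD xs i 0 = xs.getD i.toNat 0 := by
  conv_lhs => rw [← Int.toNat_of_nonneg h0]
  rw [PySem.List.pyGetD_natCast]

theorem rd_core1 (xs : List Int) (j : Nat) (hj1 : j + 1 < (rdOrder xs).length)
    (hval : PySem.List.pyGetD xs ((rdOrder xs)[j]) 0 = PySem.List.pyGetD xs ((rdOrder xs)[j+1]) 0) :
    1 < xs.count (PySem.List.pyGetD xs ((rdOrder xs)[j]) 0) := by
  have hj : j < (rdOrder xs).length := by omega
  rw [rdOrder_countP]
  have h1 : (rdOrder xs).drop j = (rdOrder xs)[j] :: (rdOrder xs).drop (j+1) :=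
    List.drop_eq_getElem_cons hj
  have h2 : (rdOrder xs).drop (j+1) = (rdOrder xs)[j+1] :: (rdOrder xs).drop (j+2) :=
    List.drop_eq_getElem_cons hj1
  have hsplit : (rdOrder xs).countP (fun i => PySem.List.pyGetD xs i 0 == PySem.List.pyGetD xs ((rdOrder xs)[j]) 0)
      = ((rdOrder xs).take j ++ (rdOrder xs)[j] :: (rdOrder xs)[j+1] :: (rdOrder xs).drop (j+2)).countP
        (fun i => PySem.List.pyGetD xs i 0 == PySem.List.pyGetD xs ((rdOrder xs)[j]) 0) := by
    rw [← h2, ← h1, List.take_append_drop]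
  rw [hsplit, List.countP_append, List.countP_cons, List.countP_cons]
  have e1 : (PySem.List.pyGetD xs ((rdOrder xs)[j]) 0 == PySem.List.pyGetD xs ((rdOrder xs)[j]) 0) = true := by simp
  have e2 : (PySem.List.pyGetD xs ((rdOrder xs)[j+1]) 0 == PySem.List.pyGetD xs ((rdOrder xs)[j]) 0) = true := by
    simp [hval.symm]
  rw [e1, e2]
  simp
  omega

theorem rd_core2 (xs : List Int) (j : Nat) (hj : j < (rdOrder xs).length)
    (hleft : j = 0 ∨ PySem.List.pyGetD xs ((rdOrder xs)[j]) 0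
      ≠ PySem.List.pyGetD xs ((rdOrder xs).getD (j - 1) 0) 0) :
    PySem.List.pyGetD xs ((rdOrder xs)[j]) 0 ∉ xs.take ((rdOrder xs)[j]).toNat := by
  intro hmem
  obtain ⟨k', hk't, hk', hval'⟩ := (mem_take_iff_idx xs _ _).mp hmem
  obtain ⟨hb0, hbn⟩ := rdOrder_elem_bounds xs j hj
  have hk'n : (k' : Int) < (xs.length : Int) := by exact_mod_cast hk'
  obtain ⟨j', hj'len, hj'eq⟩ := rdOrder_idx xs (k' : Int) (by positivity) hk'n
  have hVi' : PySem.List.pyGetD xs ((rdOrder xs)[j']) 0 = PySem.List.pyGetD xs ((rdOrder xs)[j]) 0 := by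
    rw [hj'eq, PySem.List.pyGetD_natCast, List.getD_eq_getElem xs 0 hk', hval']
  have hj'j : j' < j := by
    apply rdOrder_pos_lt xs j' j hj'len hj
    rw [Prod.Lex.lt_iff]
    refine Or.inr ⟨by simpa using hVi', ?_⟩
    simp only [ofLex_toLex]
    rw [hj'eq]
    have := Int.toNat_of_nonneg hb0
    omega
  have hj0 : j ≠ 0 := by omega
  rcases hleft with h | h
  · exact hj0 h
  · have hj1 : j - 1 < (rdOrder xs).length := by omega
    rw [List.getD_eq_getElem _ 0 hj1] at h
    have h2 := rdOrder_key_lt xs (j - 1) j hj1 hj (by omega)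
    have h1 : (toLex (PySem.List.pyGetD xs ((rdOrder xs)[j']) 0, (rdOrder xs)[j']) : Int ×ₗ Int)
        ≤ toLex (PySem.List.pyGetD xs ((rdOrder xs)[j - 1]) 0, (rdOrder xs)[j - 1]) := by
      rcases Nat.eq_or_lt_of_le (by omega : j' ≤ j - 1) with he | hlt
      · subst he; exact le_refl _
      · exact le_of_lt (rdOrder_key_lt xs j' (j - 1) hj'len hj1 hlt)
    rw [Prod.Lex.le_iff] at h1
    rw [Prod.Lex.lt_iff] at h2
    simp only [ofLex_toLex] at h1 h2
    rw [hVi'] at h1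
    apply h
    rcases h1 with h1 | h1 <;> rcases h2 with h2 | h2 <;> omega

theorem rd_core3 (xs : List Int) (j : Nat) (hj : j < (rdOrder xs).length)
    (hmin : PySem.List.pyGetD xs ((rdOrder xs)[j]) 0 ∉ xs.take ((rdOrder xs)[j]).toNat) :
    j = 0 ∨ PySem.List.pyGetD xs ((rdOrder xs)[j]) 0
      ≠ PySem.List.pyGetD xs ((rdOrder xs).getD (j - 1) 0) 0 := by
  by_cases hj0 : j = 0
  · exact Or.inl hj0
  · right
    have hj1 : j - 1 < (rdOrder xs).length := by omega
    rw [List.getD_eq_getElem _ 0 hj1]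
    intro heq
    have hklt := rdOrder_key_lt xs (j - 1) j hj1 hj (by omega)
    rw [Prod.Lex.lt_iff] at hklt
    simp only [ofLex_toLex] at hklt
    obtain ⟨hb0, hbn⟩ := rdOrder_elem_bounds xs (j - 1) hj1
    obtain ⟨hc0, hcn⟩ := rdOrder_elem_bounds xs j hj
    rcases hklt with h | ⟨hveq, hilt⟩
    · omega
    · apply hmin
      refine (mem_take_iff_idx xs _ _).mpr ⟨((rdOrder xs)[j - 1]).toNat, ?_, ?_, ?_⟩
      · omega
      · omega
      · have := rdV_eq xs ((rdOrder xs)[j - 1]) hb0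
        rw [List.getD_eq_getElem xs 0 (by omega)] at this
        rw [← this, ← heq]

theorem rd_core4 (xs : List Int) (j : Nat) (hj : j < (rdOrder xs).length)
    (hc : 1 < xs.count (PySem.List.pyGetD xs ((rdOrder xs)[j]) 0))
    (hmin : PySem.List.pyGetD xs ((rdOrder xs)[j]) 0 ∉ xs.take ((rdOrder xs)[j]).toNat) :
    ∃ hlt : j + 1 < (rdOrder xs).length,
      PySem.List.pyGetD xs ((rdOrder xs)[j]) 0 = PySem.List.pyGetD xs ((rdOrder xs)[j + 1]) 0 := by
  rw [rdOrder_countP] at hc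
  have h1 : (rdOrder xs).drop j = (rdOrder xs)[j] :: (rdOrder xs).drop (j + 1) :=
    List.drop_eq_getElem_cons hj
  have hsplit : (rdOrder xs).countP (fun i => PySem.List.pyGetD xs i 0 == PySem.List.pyGetD xs ((rdOrder xs)[j]) 0)
      = ((rdOrder xs).take j ++ (rdOrder xs)[j] :: (rdOrder xs).drop (j + 1)).countP
        (fun i => PySem.List.pyGetD xs i 0 == PySem.List.pyGetD xs ((rdOrder xs)[j]) 0) := by
    rw [← h1, List.take_append_drop]
  rw [hsplit, List.countP_append, List.countP_cons] at hc
  -- one more hit in take j or in drop (j+1)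
  have hother : 0 < ((rdOrder xs).take j).countP (fun i => PySem.List.pyGetD xs i 0 == PySem.List.pyGetD xs ((rdOrder xs)[j]) 0)
      ∨ 0 < ((rdOrder xs).drop (j + 1)).countP (fun i => PySem.List.pyGetD xs i 0 == PySem.List.pyGetD xs ((rdOrder xs)[j]) 0) := by
    by_contra hcon
    push Not at hcon
    simp at hc
    omega
  -- the "take" case contradicts minimality
  rcases hother with hother | hother
  · exfalso
    obtain ⟨x, hxmem, hxval⟩ := List.countP_pos_iff.mp hother
    obtain ⟨t, ht, _, hteq⟩ := (mem_take_iff_idx _ _ _).mp hxmem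
    rw [beq_iff_eq] at hxval
    have hklt := rdOrder_key_lt xs t j (by omega) hj ht
    rw [Prod.Lex.lt_iff] at hklt
    simp only [ofLex_toLex] at hklt
    rw [hteq, hxval] at hklt
    obtain ⟨hb0, hbn⟩ := rdOrder_elem_bounds xs j hj
    have hx0 : 0 ≤ x ∧ x < (xs.length : Int) := (rdOrder_mem xs x).mp (by rw [← hteq]; exact List.getElem_mem _)
    rcases hklt with h | ⟨_, hilt⟩
    · omega
    · apply hmin
      refine (mem_take_iff_idx xs _ _).mpr ⟨x.toNat, by omega, by omega, ?_⟩
      have := rdV_eq xs x hx0.1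
      rw [List.getD_eq_getElem xs 0 (by omega)] at this
      rw [← this, hxval]
  · obtain ⟨x, hxmem, hxval⟩ := List.countP_pos_iff.mp hother
    obtain ⟨t, ht, hteq⟩ := mem_drop_iff_idx _ _ _ hxmem
    rw [beq_iff_eq] at hxval
    have hlt : j + 1 < (rdOrder xs).length := by omega
    refine ⟨hlt, ?_⟩
    have hk1 := rdOrder_key_lt xs j (j + 1) hj hlt (by omega)
    have hk2 : (toLex (PySem.List.pyGetD xs ((rdOrder xs)[j + 1]) 0, (rdOrder xs)[j + 1]) : Int ×ₗ Int)
        ≤ toLex (PySem.List.pyGetD xs ((rdOrder xs)[j + 1 + t]) 0, (rdOrder xs)[j + 1 + t]) := by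
      rcases Nat.eq_or_lt_of_le (by omega : j + 1 ≤ j + 1 + t) with he | hlt2
      · have ht0 : t = 0 := by omega
        subst ht0
        simp
      · exact le_of_lt (rdOrder_key_lt xs (j + 1) (j + 1 + t) hlt (by omega) hlt2)
    rw [Prod.Lex.lt_iff] at hk1
    rw [Prod.Lex.le_iff] at hk2
    simp only [ofLex_toLex] at hk1 hk2
    rw [hteq, hxval] at hk2
    rcases hk1 with h | h <;> rcases hk2 with h2 | h2 <;> omega



def rdFirsts (xs : List Int) : List (Int × Int) :=
  (PySem.List.pyRange 0 (PySem.List.len (rdOrder xs)) 1).filterMap (fun j =>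
    if (j = 0 ∨ PySem.List.pyGetD xs (PySem.List.pyGetD (rdOrder xs) j 0) 0
          ≠ PySem.List.pyGetD xs (PySem.List.pyGetD (rdOrder xs) (j - 1) 0) 0)
        ∧ j + 1 < PySem.List.len (rdOrder xs)
        ∧ PySem.List.pyGetD xs (PySem.List.pyGetD (rdOrder xs) j 0) 0
          = PySem.List.pyGetD xs (PySem.List.pyGetD (rdOrder xs) (j + 1) 0) 0
    then some (PySem.List.pyGetD (rdOrder xs) j 0, PySem.List.pyGetD xs (PySem.List.pyGetD (rdOrder xs) j 0) 0)
    else none)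

theorem rdFirsts_natForm (xs : List Int) :
    rdFirsts xs = (List.range (rdOrder xs).length).filterMap (fun (j : Nat) =>
      if ((j : Int) = 0 ∨ PySem.List.pyGetD xs (PySem.List.pyGetD (rdOrder xs) (j : Int) 0) 0
            ≠ PySem.List.pyGetD xs (PySem.List.pyGetD (rdOrder xs) ((j : Int) - 1) 0) 0)
          ∧ (j : Int) + 1 < PySem.List.len (rdOrder xs)
          ∧ PySem.List.pyGetD xs (PySem.List.pyGetD (rdOrder xs) (j : Int) 0) 0
            = PySem.List.pyGetD xs (PySem.List.pyGetD (rdOrder xs) ((j : Int) + 1) 0) 0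
      then some (PySem.List.pyGetD (rdOrder xs) (j : Int) 0,
        PySem.List.pyGetD xs (PySem.List.pyGetD (rdOrder xs) (j : Int) 0) 0)
      else none) := by
  unfold rdFirsts
  rw [PySem.List.len_eq, PySem.List.pyRange_zero_nat, List.filterMap_map]
  rfl

theorem rdOrder_pyGetD (xs : List Int) (j : Nat) (hj : j < (rdOrder xs).length) :
    PySem.List.pyGetD (rdOrder xs) (j : Int) 0 = (rdOrder xs)[j] := by
  rw [PySem.List.pyGetD_natCast, List.getD_eq_getElem _ _ hj]

theorem mem_canon_iff (xs : List Int) (p : Int × Int) :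
    p ∈ rdCanon xs ↔ ∃ k : Nat, ∃ hk : k < xs.length, p = ((k : Int), xs.getD k 0)
      ∧ 1 < xs.count (xs.getD k 0) ∧ xs.getD k 0 ∉ xs.take k := by
  unfold rdCanon rdCanonUpTo
  rw [List.mem_filterMap]
  constructor
  · rintro ⟨k, hk, hbody⟩
    rw [List.mem_range] at hk
    by_cases h : 1 < xs.count (xs.getD k 0) ∧ xs.getD k 0 ∉ xs.take k
    · rw [if_pos h] at hbody
      cases hbody
      exact ⟨k, hk, rfl, h.1, h.2⟩
    · rw [if_neg h] at hbody
      cases hbody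
  · rintro ⟨k, hk, rfl, h1, h2⟩
    exact ⟨k, List.mem_range.mpr hk, by rw [if_pos ⟨h1, h2⟩]⟩

theorem mem_rdFirsts (xs : List Int) (p : Int × Int) : p ∈ rdFirsts xs ↔ p ∈ rdCanon xs := by
  rw [rdFirsts_natForm, List.mem_filterMap, mem_canon_iff]
  constructor
  · rintro ⟨j, hjmem, hbody⟩
    rw [List.mem_range] at hjmem
    split_ifs at hbody with hcnd
    · cases hbody
      obtain ⟨hcl, hcm, hcr⟩ := hcnd
      rw [PySem.List.len_eq] at hcm
      have hj1 : j + 1 < (rdOrder xs).length := by exact_mod_cast hcm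
      rw [rdOrder_pyGetD xs j hjmem] at hcl hcr ⊢
      have hcast1 : ((j : Int) + 1) = ((j + 1 : Nat) : Int) := by push_cast; ring
      rw [hcast1, rdOrder_pyGetD xs (j + 1) hj1] at hcr
      have hcount := rd_core1 xs j hj1 hcr
      have hleft : j = 0 ∨ PySem.List.pyGetD xs ((rdOrder xs)[j]) 0
          ≠ PySem.List.pyGetD xs ((rdOrder xs).getD (j - 1) 0) 0 := by
        by_cases hj0 : j = 0
        · exact Or.inl hj0
        · rcases hcl with h | h
          · exact absurd (by exact_mod_cast h) hj0
          · right
            have hcast2 : ((j : Int) - 1) = ((j - 1 : Nat) : Int) := by omega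
            rw [hcast2, PySem.List.pyGetD_natCast] at h
            exact h
      have hmin := rd_core2 xs j hjmem hleft
      obtain ⟨hb0, hbn⟩ := rdOrder_elem_bounds xs j hjmem
      have hVg : xs.getD (((rdOrder xs)[j]).toNat) 0 = PySem.List.pyGetD xs ((rdOrder xs)[j]) 0 :=
        (rdV_eq xs _ hb0).symm
      exact ⟨((rdOrder xs)[j]).toNat, by omega,
        by rw [hVg, Int.toNat_of_nonneg hb0],
        by rw [hVg]; exact hcount,
        by rw [hVg]; exact hmin⟩
  · rintro ⟨k, hk, rfl, hcnt, hmin⟩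
    obtain ⟨j, hjlen, hjeq⟩ := rdOrder_idx xs (k : Int) (by positivity) (by exact_mod_cast hk)
    refine ⟨j, List.mem_range.mpr hjlen, ?_⟩
    have hVj : PySem.List.pyGetD xs ((rdOrder xs)[j]) 0 = xs.getD k 0 := by
      rw [hjeq, PySem.List.pyGetD_natCast]
    have htoNat : ((rdOrder xs)[j]).toNat = k := by rw [hjeq]; exact Int.toNat_natCast k
    have hminj : PySem.List.pyGetD xs ((rdOrder xs)[j]) 0 ∉ xs.take (((rdOrder xs)[j]).toNat) := by
      rw [hVj, htoNat]; exact hmin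
    have hcntj : 1 < xs.count (PySem.List.pyGetD xs ((rdOrder xs)[j]) 0) := by
      rw [hVj]; exact hcnt
    obtain ⟨hlt, hval⟩ := rd_core4 xs j hjlen hcntj hminj
    have hleft := rd_core3 xs j hjlen hminj
    have hcast1 : ((j : Int) + 1) = ((j + 1 : Nat) : Int) := by push_cast; ring
    rw [if_pos ?_]
    · rw [rdOrder_pyGetD xs j hjlen, hjeq, PySem.List.pyGetD_natCast]
    · refine ⟨?_, ?_, ?_⟩
      · rcases hleft with h | h
        · exact Or.inl (by exact_mod_cast h)
        · by_cases hj0 : j = 0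
          · exact Or.inl (by exact_mod_cast hj0)
          · right
            have hcast2 : ((j : Int) - 1) = ((j - 1 : Nat) : Int) := by omega
            rw [rdOrder_pyGetD xs j hjlen, hcast2, PySem.List.pyGetD_natCast]
            exact h
      · rw [PySem.List.len_eq]; exact_mod_cast hlt
      · rw [rdOrder_pyGetD xs j hjlen, hcast1, rdOrder_pyGetD xs (j + 1) hlt]
        exact hval

theorem canon_pairwise_fst (xs : List Int) : (rdCanon xs).Pairwise (fun p q => p.1 < q.1) := by
  unfold rdCanon rdCanonUpTo
  refine List.Pairwise.filterMap _ ?_ List.pairwise_lt_range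
  intro a a' hlt b hb b' hb'
  split_ifs at hb hb' with h1 h2
  cases hb
  cases hb'
  show (a : Int) < (a' : Int)
  exact_mod_cast hlt

theorem canon_nodup (xs : List Int) : (rdCanon xs).Nodup := by
  refine (canon_pairwise_fst xs).imp ?_
  intro p q h heq
  rw [heq] at h
  exact lt_irrefl _ h

theorem firsts_nodup (xs : List Int) : (rdFirsts xs).Nodup := by
  rw [rdFirsts_natForm]
  show List.Pairwise _ _
  refine List.Pairwise.filterMap _ ?_ List.pairwise_lt_range
  intro a a' hlt b hb b' hb'
  split_ifs at hb hb' with h1 h2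
  cases hb
  cases hb'
  have ha : a < (rdOrder xs).length := by
    have := h1.2.1
    rw [PySem.List.len_eq] at this
    omega
  have ha' : a' < (rdOrder xs).length := by
    have := h2.2.1
    rw [PySem.List.len_eq] at this
    omega
  rw [rdOrder_pyGetD xs a ha, rdOrder_pyGetD xs a' ha']
  intro he
  exact (List.pairwise_iff_getElem.mp (rdOrder_nodup xs) a a' ha ha' hlt)
    (by simpa using congrArg Prod.fst he)

theorem firstDups_eq_pre (xs : List Int) :
    PySem.List.sorted2 (rdFirsts xs) (fun p => p.1) (fun p => p.2) = rdCanon xs := by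
  apply sorted2_eq_of_perm_of_pairwise_lt
  · exact (List.perm_ext_iff_of_nodup (canon_nodup xs) (firsts_nodup xs)).mpr
      (fun a => (mem_rdFirsts xs a).symm)
  · refine (canon_pairwise_fst xs).imp ?_
    intro p q h
    rw [Prod.Lex.lt_iff]
    exact Or.inl (by simpa using h)


theorem firstDups_eq (xs : List Int) : rdFirstDups xs = rdCanon xs := by
  have hdecomp : rdFirstDups xs = PySem.List.sorted2 (rdFirsts xs) (fun p => p.1) (fun p => p.2) := by
    unfold rdFirstDups rdFirsts rdOrder
    simp only [sorted2_eq_sorted_lex]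
  rw [hdecomp, firstDups_eq_pre]


theorem dict_fold_get? (L : List (Int × Int)) (d0 : PySem.Dict Int Int) (a : Int) :
    (L.foldl (fun d q => d.insert q.1 q.2) d0).get? a
      = ((PySem.Dict.ofList L).get? a).or (d0.get? a) := by
  induction L generalizing d0 with
  | nil => simp [PySem.Dict.ofList, PySem.Dict.update, PySem.Dict.get?_empty]
  | cons q L ih =>
    have hof : (PySem.Dict.ofList (q :: L)).get? a
        = ((PySem.Dict.ofList L).get? a).or ((PySem.Dict.empty.insert q.1 q.2).get? a) := by
      show ((L.foldl (fun d q => d.insert q.1 q.2) (PySem.Dict.empty.insert q.1 q.2)).get? a) = _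
      exact ih _
    simp only [List.foldl_cons, ih (d0.insert q.1 q.2), hof, Option.or_assoc]
    congr 1
    rw [PySem.Dict.get?_insert, PySem.Dict.get?_insert, PySem.Dict.get?_empty]
    by_cases h : a = q.1 <;> simp [h]

theorem enumerate_set (xs : List Int) (nn : Nat) (v : Int) (s : Int) :
    PySem.List.enumerate (xs.set nn v) s
      = (PySem.List.enumerate xs s).map (fun q => if q.1 = s + (nn : Int) then (q.1, v) else q) := by
  induction xs generalizing nn s with
  | nil => simp [PySem.List.enumerate_nil]
  | cons x xs ih =>
    cases nn with
    | zero =>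
      simp only [List.set_cons_zero, PySem.List.enumerate_cons, List.map_cons, Nat.cast_zero,
        add_zero]
      have hid : ∀ q ∈ PySem.List.enumerate xs (s + 1), (if q.1 = s then (q.1, v) else q) = q := by
        intro q hq
        rcases (PySem.List.mem_enumerate_iff _ _ _).mp hq with ⟨k, hk, rfl⟩
        rw [if_neg (by simp; omega)]
      rw [List.map_congr_left hid]
      simp
    | succ n =>
      simp only [List.set_cons_succ, PySem.List.enumerate_cons, List.map_cons]
      rw [if_neg (by omega), ih]
      have h : s + 1 + (n : Int) = s + ((n + 1 : Nat) : Int) := by push_cast; ring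
      rw [h]

theorem foldl_pySetD_eq_map (L : List (Int × Int)) (xs : List Int) (hL : ∀ p ∈ L, 0 ≤ p.1) :
    L.foldl (fun ys p => PySem.List.pySetD ys p.1 p.2) xs
      = (PySem.List.enumerate xs 0).map (fun q => (PySem.Dict.ofList L).getD q.1 q.2) := by
  induction L generalizing xs with
  | nil =>
    simp [PySem.Dict.ofList, PySem.Dict.update, PySem.Dict.getD_eq_get?_getD,
      PySem.Dict.get?_empty, PySem.List.map_snd_enumerate]
  | cons p L ih =>
    have hp : 0 ≤ p.1 := hL p List.mem_cons_self
    have hcast : ((p.1.toNat : Int)) = p.1 := Int.toNat_of_nonneg hp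
    simp only [List.foldl_cons]
    rw [PySem.List.pySetD_of_nonneg xs p.2 hp,
      ih _ (fun q hq => hL q (List.mem_cons_of_mem _ hq)), enumerate_set, List.map_map]
    apply List.map_congr_left
    intro q _
    have hof : (PySem.Dict.ofList (p :: L)).get? q.1
        = ((PySem.Dict.ofList L).get? q.1).or (if q.1 = p.1 then some p.2 else none) := by
      have h2 : (PySem.Dict.ofList (p :: L)).get? q.1
          = ((PySem.Dict.ofList L).get? q.1).or ((PySem.Dict.empty.insert p.1 p.2).get? q.1) := by
        show ((L.foldl (fun d q => d.insert q.1 q.2) (PySem.Dict.empty.insert p.1 p.2)).get? q.1) = _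
        exact dict_fold_get? L _ q.1
      rw [h2, PySem.Dict.get?_insert, PySem.Dict.get?_empty]
    simp only [Function.comp, zero_add, hcast]
    by_cases h : q.1 = p.1
    · simp only [if_pos h, PySem.Dict.getD_eq_get?_getD, hof]
      rcases hG : (PySem.Dict.ofList L).get? q.1 with _ | w <;> simp
    · simp only [if_neg h, PySem.Dict.getD_eq_get?_getD, hof, Option.or_none]

theorem pyGetD_zip {α β : Type} (l1 : List α) (l2 : List β) (j : Int) (d1 : α) (d2 : β)
    (h0 : 0 ≤ j) (h1 : j < (l1.length : Int)) (h2 : j < (l2.length : Int)) :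
    PySem.List.pyGetD (l1.zip l2) j (d1, d2)
      = (PySem.List.pyGetD l1 j d1, PySem.List.pyGetD l2 j d2) := by
  have hk1 : j.toNat < l1.length := by omega
  have hk2 : j.toNat < l2.length := by omega
  have hkz : j.toNat < (l1.zip l2).length := by rw [List.length_zip]; omega
  conv_lhs => rw [← Int.toNat_of_nonneg h0]
  conv_rhs => rw [← Int.toNat_of_nonneg h0]
  rw [PySem.List.pyGetD_natCast, PySem.List.pyGetD_natCast, PySem.List.pyGetD_natCast,
    List.getD_eq_getElem _ _ hkz, List.getD_eq_getElem _ _ hk1, List.getD_eq_getElem _ _ hk2,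
    List.getElem_zip]

-- ===== VERDICT (by name: the statement is the Claim_ definition above) =====
theorem replace_duplicates_spec : Claim_equal_replace_duplicates := by
  intro child1 child2 _hDom hPre
  unfold Spec_replace_duplicates
  simp only [replace_duplicates, replace_duplicates_alt, findDups_eq, firstDups_eq]
  by_cases h0 : rdCanon child1 = []
  · simp [h0]
  · have hlen0 : ¬ ((rdCanon child1).map (·.2)).length = 0 := by
      simpa [List.length_eq_zero_iff] using h0
    rw [if_neg hlen0, if_neg h0]
    have hm : (rdCanon child1).length ≤ (rdCanon child2).length := by
      rcases hPre with h | h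
      · exact absurd (by rw [← canon_length] at h; exact List.length_eq_zero_iff.mp h) h0
      · rw [← canon_length, ← canon_length] at h
        exact h
    have hZlen : ((rdCanon child1).zip (rdCanon child2)).length = (rdCanon child1).length := by
      rw [List.length_zip]; omega
    simp only [PySem.List.len_eq, List.length_map]
    rw [show ((rdCanon child1).length : Int)
        = (((rdCanon child1).zip (rdCanon child2)).length : Int) by rw [hZlen]]
    rw [PySem.List.foldl_congr_mem _ _
      (fun acc j => ((fun (st : List Int × List Int) (z : (Int × Int) × (Int × Int)) =>
          (PySem.List.pySetD st.1 z.1.1 z.2.2, PySem.List.pySetD st.2 z.2.1 z.1.2)) acc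
        (PySem.List.pyGetD ((rdCanon child1).zip (rdCanon child2)) j ((0, 0), (0, 0))))) _ ?_]
    · rw [PySem.List.foldl_pyRange_zero_pyGetD'
        ((rdCanon child1).zip (rdCanon child2)) ((0, 0), (0, 0))
        (fun (st : List Int × List Int) (z : (Int × Int) × (Int × Int)) =>
          (PySem.List.pySetD st.1 z.1.1 z.2.2, PySem.List.pySetD st.2 z.2.1 z.1.2))
        (child1, child2)]
      rw [PySem.List.foldl_prod_mk
        (f := fun s (z : (Int × Int) × (Int × Int)) => PySem.List.pySetD s z.1.1 z.2.2)
        (g := fun s (z : (Int × Int) × (Int × Int)) => PySem.List.pySetD s z.2.1 z.1.2)]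
      have hfold1 : ((rdCanon child1).zip (rdCanon child2)).foldl
          (fun s (z : (Int × Int) × (Int × Int)) => PySem.List.pySetD s z.1.1 z.2.2) child1
          = (((rdCanon child1).zip (rdCanon child2)).map (fun z => (z.1.1, z.2.2))).foldl
            (fun s (p : Int × Int) => PySem.List.pySetD s p.1 p.2) child1 := by
        rw [List.foldl_map]
      have hfold2 : ((rdCanon child1).zip (rdCanon child2)).foldl
          (fun s (z : (Int × Int) × (Int × Int)) => PySem.List.pySetD s z.2.1 z.1.2) child2
          = (((rdCanon child1).zip (rdCanon child2)).map (fun z => (z.2.1, z.1.2))).foldl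
            (fun s (p : Int × Int) => PySem.List.pySetD s p.1 p.2) child2 := by
        rw [List.foldl_map]
      have hL1 : ((rdCanon child1).zip (rdCanon child2)).map (fun z => (z.1.1, z.2.2))
          = ((rdCanon child1).map (·.1)).zip ((rdCanon child2).map (·.2)) := by
        rw [List.zip_map]
        apply List.map_congr_left
        rintro ⟨⟨a, b⟩, ⟨c, d⟩⟩ _
        rfl
      have hL2 : ((rdCanon child1).zip (rdCanon child2)).map (fun z => (z.2.1, z.1.2))
          = ((rdCanon child2).map (·.1)).zip ((rdCanon child1).map (·.2)) := by
        rw [List.zip_map, ← List.zip_swap, List.map_map]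
        apply List.map_congr_left
        rintro ⟨⟨a, b⟩, ⟨c, d⟩⟩ _
        rfl
      have hkeys1 : ∀ p ∈ ((rdCanon child1).map (·.1)).zip ((rdCanon child2).map (·.2)), 0 ≤ p.1 := by
        rintro ⟨a, b⟩ hp
        obtain ⟨ha, _⟩ := List.of_mem_zip hp
        obtain ⟨q, hq, rfl⟩ := List.mem_map.mp ha
        exact (canon_fst_bounds child1 q hq).1
      have hkeys2 : ∀ p ∈ ((rdCanon child2).map (·.1)).zip ((rdCanon child1).map (·.2)), 0 ≤ p.1 := by
        rintro ⟨a, b⟩ hp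
        obtain ⟨ha, _⟩ := List.of_mem_zip hp
        obtain ⟨q, hq, rfl⟩ := List.mem_map.mp ha
        exact (canon_fst_bounds child2 q hq).1
      rw [hfold1, hfold2, hL1, hL2,
        foldl_pySetD_eq_map _ _ hkeys1, foldl_pySetD_eq_map _ _ hkeys2]
    · intro acc j hj
      rw [PySem.List.mem_pyRange_one] at hj
      obtain ⟨h0j, hjm⟩ := hj
      beta_reduce
      have hjm1 : j < ((rdCanon child1).length : Int) := by
        rw [hZlen] at hjm
        exact_mod_cast hjm
      have hjm2 : j < ((rdCanon child2).length : Int) := by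
        have : ((rdCanon child1).length : Int) ≤ ((rdCanon child2).length : Int) := by
          exact_mod_cast hm
        omega
      rw [pyGetD_zip _ _ j ((0 : Int), (0 : Int)) ((0 : Int), (0 : Int)) h0j hjm1 hjm2,
        PySem.List.pyGetD_map (·.1) (rdCanon child1) j ((0 : Int), (0 : Int)),
        PySem.List.pyGetD_map (·.2) (rdCanon child2) j ((0 : Int), (0 : Int)),
        PySem.List.pyGetD_map (·.1) (rdCanon child2) j ((0 : Int), (0 : Int)),
        PySem.List.pyGetD_map (·.2) (rdCanon child1) j ((0 : Int), (0 : Int))]
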